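-- pv_equiv track=rewrite | github.com/4923/python_workbook2014 | list/115.py | changed
-- ===== SOURCE A (Python) =====
-- def changed(text, vowels):  # input str, output changed text
--   # 1. 첫 문자가 모음일 때
--   if text[0] in vowels:
--     result = ''.join(text) + 'way'
--   # 2. 모음이 하나도 없을 때, 원래 문자열 그대로 받음
--   elif [x for x in list(text) if x in vowels] == None:
--     result = ''.join(text)
--   # 3. 첫 문자 이후에 모음이 있을 때
--   else:
--     # v = text의 첫 모음원소, type(v) = str
--     v = [v for v in text if v in vowels][0]
--     index = text.index(v) # 첫 모음의 index
--
--     # 3-1 앞 뒤 조합 변경, type(text_result) = list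
--     text_front, text_back = text[:index], text[index:]  # index를 기준으로 앞 뒤 slice
--     text_result = text_back + text_front
--
--     # 4. 끝문자 ay 추가, list에서 str로 변경
--     result = ''.join(text_result) + 'ay'
--   return result
-- ===== SOURCE B (Python) =====
-- def changed(text, vowels):
--     # queue-rotation pig latin: move the leading consonant to the back, one
--     # character per step, until a vowel leads; no index or filter list is built
--     if text[0] in vowels:
--         return text + 'way'
--     s = text[1:] + text[0]
--     for _ in range(len(text) - 1):
--         if s[0] in vowels:
--             return s + 'ay'
--         s = s[1:] + s[0]
--     raise IndexError('text contains no vowel')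
-- ===== Notes on version B (the rewrite author's own statement) =====
-- stated objective: alternative
-- what changed: B never computes the first-vowel index or a filter list: it rotates the string one character at a time (leading consonant moved to the back) until a vowel leads, returning the rotated string itself; A builds a vowel-filter list, re-scans with text.index and slices at that index (plus a dead '== None' branch).
import Mathlib
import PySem

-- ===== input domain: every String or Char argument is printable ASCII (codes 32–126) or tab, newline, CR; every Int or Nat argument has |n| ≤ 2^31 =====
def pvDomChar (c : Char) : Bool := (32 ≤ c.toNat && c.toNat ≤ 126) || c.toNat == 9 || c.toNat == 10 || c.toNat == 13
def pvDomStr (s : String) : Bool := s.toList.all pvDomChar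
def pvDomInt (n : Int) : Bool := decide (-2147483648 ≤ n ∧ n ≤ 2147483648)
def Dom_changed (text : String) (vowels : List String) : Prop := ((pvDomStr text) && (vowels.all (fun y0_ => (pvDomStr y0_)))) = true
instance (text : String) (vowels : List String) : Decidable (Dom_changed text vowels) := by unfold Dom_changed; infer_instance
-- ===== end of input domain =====

-- B replaces A's vowel-filter list + text.index + slicing (and a dead '== None' branch)
-- by a queue rotation: the leading consonant is moved to the back one character per
-- step until a vowel leads, and the rotated string itself is the answer.

-- ===== PORT A =====
def changed (text : String) (vowels : List String) : String :=
  let cs := text.toList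
  match PySem.List.pyGet? cs 0 with
  | none => ""   -- text[0]: IndexError on empty text, excluded by Pre_changed
  | some c0 =>
    if vowels.contains (String.ofList [c0]) then
      String.ofList (cs ++ ['w', 'a', 'y'])                  -- ''.join(text) + 'way'
    else if false then
      -- Python's `[x for x in list(text) if x in vowels] == None` is always False
      String.ofList cs
    else
      match cs.filter (fun c => vowels.contains (String.ofList [c])) with
      | [] => ""   -- [...][0]: IndexError when text has no vowel, excluded by Pre_changed
      | v :: _ =>
        match PySem.List.index? cs v with
        | none => ""   -- unreachable: v was taken from cs
        | some idx =>
          let front := PySem.List.slice cs none (some (idx : Int))   -- text[:index]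
          let back  := PySem.List.slice cs (some (idx : Int)) none   -- text[index:]
          String.ofList (back ++ front ++ ['a', 'y'])        -- ''.join(back + front) + 'ay'

-- ===== PORT B =====
-- the for-loop of Source B: up to `fuel` times, return s+'ay' if a vowel leads, else
-- rotate the leading character to the back; none = the IndexError raised after the loop
def pvRotLoop (vowels : List String) (s : List Char) (fuel : Nat) : Option (List Char) :=
  match fuel, s with
  | 0, _ => none   -- loop exhausted: raise IndexError, excluded by Pre_changed
  | _ + 1, [] => none   -- s[0] on empty (unreachable from changed_alt on nonempty text)
  | fuel + 1, c :: rest =>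
    if vowels.contains (String.ofList [c]) then some (c :: rest)
    else pvRotLoop vowels (rest ++ [c]) fuel

def changed_alt (text : String) (vowels : List String) : String :=
  let cs := text.toList
  match cs with
  | [] => ""   -- text[0]: IndexError, excluded by Pre_changed
  | c :: rest =>
    if vowels.contains (String.ofList [c]) then
      String.ofList (cs ++ ['w', 'a', 'y'])                -- text + 'way'
    else
      match pvRotLoop vowels (rest ++ [c]) (cs.length - 1) with
      | none => ""   -- IndexError (no vowel in text), excluded by Pre_changed
      | some s => String.ofList (s ++ ['a', 'y'])          -- s + 'ay'

-- ===== PRECONDITION & SPEC =====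
-- Pre_ excludes exactly the inputs where A raises IndexError: empty text (text[0])
-- and text containing no character that is in vowels ([...][0]).
def Pre_changed (text : String) (vowels : List String) : Prop :=
  text.toList.any (fun c => vowels.contains (String.ofList [c])) = true
instance (text : String) (vowels : List String) : Decidable (Pre_changed text vowels) := by
  unfold Pre_changed; infer_instance

def pvWitness_changed : String × List String := ("strong", ["a", "e", "i", "o", "u"])

def Spec_changed (text : String) (vowels : List String) (out : String) : Prop := out = changed_alt text vowels
instance (text : String) (vowels : List String) (out : String) : Decidable (Spec_changed text vowels out) := by unfold Spec_changed; infer_instance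

-- ===== CLAIM (what is proved, stated in full; the proofs are below) =====
def Claim_equal_changed : Prop := ∀ (text : String) (vowels : List String), Dom_changed text vowels → Pre_changed text vowels → Spec_changed text vowels (changed text vowels)

-- ===== LEMMAS AND PROOFS =====

-- any input with a p-element splits as pre ++ v :: suf, p failing on all of pre
theorem pv_exists_split {α : Type} (p : α → Bool) :
    ∀ cs : List α, cs.any p = true →
      ∃ pre v suf, cs = pre ++ v :: suf ∧ p v = true ∧ ∀ c ∈ pre, p c = false := by
  intro cs h
  induction cs with
  | nil => simp at h
  | cons c cs ih =>
    by_cases hc : p c = true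
    · exact ⟨[], c, cs, rfl, hc, by simp⟩
    · rw [List.any_cons, Bool.eq_false_iff.2 hc, Bool.false_or] at h
      obtain ⟨pre, v, suf, h1, h2, h3⟩ := ih h
      exact ⟨c :: pre, v, suf, by simp [h1], h2, by
        intro x hx
        rcases List.mem_cons.1 hx with rfl | hx
        · simpa using hc
        · exact h3 x hx⟩

theorem pv_filter_split {α : Type} (p : α → Bool) (pre : List α) (v : α) (suf : List α)
    (hpre : ∀ c ∈ pre, p c = false) (hv : p v = true) :
    (pre ++ v :: suf).filter p = v :: suf.filter p := by
  rw [List.filter_append, List.filter_eq_nil_iff.2 (by intro c hc; simp [hpre c hc])]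
  simp [hv]

theorem pv_index_split {α : Type} [BEq α] [LawfulBEq α] (p : α → Bool) (pre : List α) (v : α) (suf : List α)
    (hpre : ∀ c ∈ pre, p c = false) (hv : p v = true) :
    PySem.List.index? (pre ++ v :: suf) v = some pre.length := by
  refine (PySem.List.index?_eq_some_iff _ _ _).2 ⟨pre, suf, rfl, rfl, ?_⟩
  intro hmem
  have := hpre v hmem
  simp [hv] at this

-- the rotation loop carries every non-vowel prefix to the back and stops at the vowel
theorem pvRotLoop_split (vowels : List String) :
    ∀ (pre : List Char) (v : Char) (rest : List Char) (fuel : Nat),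
      (∀ c ∈ pre, vowels.contains (String.ofList [c]) = false) →
      vowels.contains (String.ofList [v]) = true →
      pre.length < fuel →
      pvRotLoop vowels (pre ++ v :: rest) fuel = some (v :: (rest ++ pre)) := by
  intro pre
  induction pre with
  | nil =>
    intro v rest fuel _ hv hlt
    have hv' : String.ofList [v] ∈ vowels := by simpa using hv
    match fuel, hlt with
    | fuel + 1, _ => simp [pvRotLoop, hv']
  | cons c pre ih =>
    intro v rest fuel hpre hv hlt
    match fuel, hlt with
    | fuel + 1, hlt =>
      have hc' : String.ofList [c] ∉ vowels := by
        simpa using hpre c (by simp)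
      simp only [List.cons_append, pvRotLoop]
      rw [if_neg (by simpa using hc')]
      have harg : (pre ++ v :: rest) ++ [c] = pre ++ v :: (rest ++ [c]) := by simp
      rw [harg, ih v (rest ++ [c]) fuel (fun x hx => hpre x (by simp [hx])) hv
            (Nat.lt_of_succ_lt_succ hlt)]
      simp

-- ===== VERDICT =====
theorem changed_spec : Claim_equal_changed := by
  intro text vowels _ hpre
  unfold Spec_changed changed changed_alt
  obtain ⟨pre, v, suf, hsplit, hv, hpref⟩ :=
    pv_exists_split (fun c => vowels.contains (String.ofList [c])) text.toList
      (by simpa [Pre_changed] using hpre)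
  simp only [hsplit]
  cases pre with
  | nil =>
    have hv' : String.ofList [v] ∈ vowels := by simpa using hv
    rw [List.nil_append, PySem.List.pyGet?_zero_cons]
    simp [hv']
  | cons c pre =>
    have hc' : String.ofList [c] ∉ vowels := by simpa using hpref c (by simp)
    simp only [pv_filter_split _ (c :: pre) v suf hpref hv]
    rw [List.cons_append, PySem.List.pyGet?_zero_cons, ← List.cons_append]
    rw [pv_index_split _ (c :: pre) v suf hpref hv]
    have hcast : ((pre.length : Int) + 1) = ((pre.length + 1 : Nat) : Int) := by
      push_cast; ring
    have hslice1 : PySem.List.slice (c :: (pre ++ v :: suf))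
        (some ((pre.length : Int) + 1)) none = v :: suf := by
      rw [hcast, PySem.List.slice_from_natCast,
          show c :: (pre ++ v :: suf) = (c :: pre) ++ (v :: suf) from by simp]
      exact List.drop_left' (by simp)
    have hslice2 : PySem.List.slice (c :: (pre ++ v :: suf))
        none (some ((pre.length : Int) + 1)) = c :: pre := by
      rw [hcast, PySem.List.slice_to_natCast,
          show c :: (pre ++ v :: suf) = (c :: pre) ++ (v :: suf) from by simp]
      exact List.take_left' (by simp)
    have hrot : pvRotLoop vowels (pre ++ v :: (suf ++ [c]))
        (pre.length + (suf.length + 1)) = some (v :: ((suf ++ [c]) ++ pre)) :=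
      pvRotLoop_split vowels pre v (suf ++ [c]) _
        (fun x hx => hpref x (by simp [hx])) hv (by omega)
    simp [hslice1, hslice2, hrot, hc']
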